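-- pv_equiv track=rewrite | github.com/Hulyamr13/hackerrank | Bonetrousle.py | get_shifted_array
-- ===== SOURCE A (Python) =====
-- def get_shifted_array(n, k, b):
--     cur_sum = int(b * (1 + b) / 2)
--     res = [x + 1 for x in range(b)]
--     if cur_sum > n:
--         return [-1]
--     max_shift = k - b
--     for i in reversed(range(b)):
--         shift = min(max_shift, n - cur_sum)
--         res[i] += shift
--         cur_sum += shift
--     if cur_sum < n:
--         return [-1]
--     return res
-- ===== SOURCE B (Python) =====
-- def get_shifted_array(n, k, b):
--     cur_sum = int(b * (1 + b) / 2)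
--     if cur_sum > n:
--         return [-1]
--     res = list(range(1, b + 1))
--     surplus = n - cur_sum
--     m = k - b
--     if surplus > len(res) * m:
--         return [-1]
--     if surplus:
--         full, partial = divmod(surplus, m)
--         cut = len(res) - full
--         res = res[:cut] + [x + m for x in res[cut:]]
--         if partial:
--             res[cut - 1] += partial
--     return res
-- ===== Notes on version B (the rewrite author's own statement) =====
-- stated objective: faster
-- what changed: A distributes the surplus n - sum(1..b) by iterating over all b positions in reverse, adding min(max_shift, remaining) to each while tracking the running sum; B decides feasibility with a single comparison (surplus <= len(res)*max_shift), then places the shifts in closed form with one divmod: the last `full` elements get +max_shift via a slice rebuild and the element before them gets the remainder.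
import Mathlib
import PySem

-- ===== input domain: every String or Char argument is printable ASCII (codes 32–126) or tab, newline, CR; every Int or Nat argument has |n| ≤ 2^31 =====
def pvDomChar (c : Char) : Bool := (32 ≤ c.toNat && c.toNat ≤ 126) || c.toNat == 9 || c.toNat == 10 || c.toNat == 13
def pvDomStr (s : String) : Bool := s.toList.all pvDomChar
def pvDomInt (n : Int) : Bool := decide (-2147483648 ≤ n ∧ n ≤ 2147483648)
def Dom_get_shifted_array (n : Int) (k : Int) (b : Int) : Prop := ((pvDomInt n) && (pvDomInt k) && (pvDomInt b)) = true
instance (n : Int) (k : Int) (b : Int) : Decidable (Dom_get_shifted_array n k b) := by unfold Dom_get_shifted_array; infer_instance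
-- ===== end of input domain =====

-- B replaces A's element-by-element reverse distribution loop (a min-capped shift per element)
-- with one feasibility comparison plus a single divmod that places the shifts in closed form;
-- equivalence of return values is proved for all inputs.

-- Models CPython's `int(p / 2)` for even p exactly: p/2 is an exact integer T,
-- and float(T) rounds T to 53 significant bits (round-half-even).  Used by BOTH ports,
-- since both Pythons contain the same expression `int(b * (1 + b) / 2)` (b*(1+b) is even and ≥ 0).
def pvRound53 (T : Int) : Int :=
  if T < 2 ^ 53 then T
  else
    let m := T.toNat.log2 - 52
    let d : Int := 2 ^ m
    let a := T / d
    let r := T % d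
    let q := if 2 * r < d then a else if 2 * r > d then a + 1 else if a % 2 = 0 then a else a + 1
    q * d

-- ===== PORT A =====
-- the body of A's `for i in reversed(range(b))` loop, state = (res, cur_sum)
def pvStepA (max_shift n : Int) (st : List Int × Int) (i : Int) : List Int × Int :=
  let shift := min max_shift (n - st.2)
  (st.1.set i.toNat (st.1.getD i.toNat 0 + shift), st.2 + shift)

def get_shifted_array (n : Int) (k : Int) (b : Int) : List Int :=
  let cur_sum := pvRound53 (b * (1 + b) / 2)   -- int(b * (1 + b) / 2)
  let res := (PySem.List.pyRange 0 b 1).map (fun x => x + 1)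
  if cur_sum > n then [-1]
  else
    let max_shift := k - b
    let st := (PySem.List.pyRange 0 b 1).reverse.foldl (pvStepA max_shift n) (res, cur_sum)
    if st.2 < n then [-1] else st.1

-- ===== PORT B =====
def get_shifted_array_alt (n : Int) (k : Int) (b : Int) : List Int :=
  let cur_sum := pvRound53 (b * (1 + b) / 2)   -- int(b * (1 + b) / 2)
  if cur_sum > n then [-1]
  else
    let res := PySem.List.pyRange 1 (b + 1) 1   -- list(range(1, b + 1))
    let surplus := n - cur_sum
    let m := k - b
    if surplus > (res.length : Int) * m then [-1]
    else if surplus ≠ 0 then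
      let full := PySem.Int.floordiv surplus m
      let part := PySem.Int.mod surplus m
      let cut := (res.length : Int) - full
      -- res = res[:cut] + [x + m for x in res[cut:]]
      let res2 := PySem.List.slice res none (some cut)
                  ++ (PySem.List.slice res (some cut) none).map (fun x => x + m)
      -- if partial: res[cut - 1] += partial   (cut ≥ 1 holds whenever part ≠ 0)
      if part ≠ 0 then res2.set (cut - 1).toNat (res2.getD (cut - 1).toNat 0 + part) else res2
    else res

-- ===== PRECONDITION & SPEC =====
def Spec_get_shifted_array (n : Int) (k : Int) (b : Int) (out : List Int) : Prop := out = get_shifted_array_alt n k b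
instance (n : Int) (k : Int) (b : Int) (out : List Int) : Decidable (Spec_get_shifted_array n k b out) := by unfold Spec_get_shifted_array; infer_instance

-- ===== CLAIM (what is proved, stated in full; the proofs are below) =====
def Claim_equal_get_shifted_array : Prop := ∀ (n : Int) (k : Int) (b : Int), Dom_get_shifted_array n k b → Spec_get_shifted_array n k b (get_shifted_array n k b)

-- ===== LEMMAS AND PROOFS =====

-- telescoping fact about the per-step shift `min m R`
lemma pv_key (t m R : Int) (ht : 0 ≤ t) (hR : 0 ≤ R) :
    min (t * m) (R - min m R) = min ((t + 1) * m) R - min m R := by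
  have h1 : (t + 1) * m = t * m + m := by ring
  by_cases h : m ≤ R
  · omega
  · have hm : 0 < m := lt_of_le_of_lt hR (by omega)
    have htm : 0 ≤ t * m := mul_nonneg ht hm.le
    omega

-- closed form of A's reverse loop
lemma pv_loopA_char (m n : Int) (j : Nat) : ∀ (res : List Int) (s : Int),
    j ≤ res.length → s ≤ n →
    ((List.range j).reverse.map (fun i : Nat => (i : Int))).foldl (pvStepA m n) (res, s) =
      ((List.range res.length).map (fun i => res.getD i 0 +
          (if i < j then min (((j : Int) - i) * m) (n - s) - min (((j : Int) - i - 1) * m) (n - s) else 0)),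
       s + min ((j : Int) * m) (n - s)) := by
  induction j with
  | zero =>
    intro res s _ hs
    simp only [List.range_zero, List.reverse_nil, List.map_nil, List.foldl_nil]
    refine Prod.ext ?_ ?_
    · apply List.ext_getElem
      · simp
      · intro i h1 h2
        simp at h2
        simp [h2]
    · simp
      omega
  | succ j ih =>
    intro res s hj hs
    have hjlen : j < res.length := by omega
    have hR : 0 ≤ n - s := by omega
    rw [List.range_succ, List.reverse_append]
    simp only [List.reverse_cons, List.reverse_nil, List.nil_append, List.singleton_append,
      List.map_cons, List.foldl_cons]
    have hstep : pvStepA m n (res, s) (j : Int) =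
        (res.set j (res.getD j 0 + min m (n - s)), s + min m (n - s)) := by
      simp [pvStepA]
    rw [hstep]
    have hlen' : j ≤ (res.set j (res.getD j 0 + min m (n - s))).length := by
      simp; omega
    have hs' : s + min m (n - s) ≤ n := by omega
    rw [ih _ _ hlen' hs']
    have hR' : n - (s + min m (n - s)) = (n - s) - min m (n - s) := by ring
    refine Prod.ext ?_ ?_
    · simp only [List.length_set]
      apply List.map_congr_left
      intro i hi
      simp only [List.mem_range] at hi
      by_cases hij : i = j
      · subst hij
        have h1 : (res.set i (res.getD i 0 + min m (n - s))).getD i 0 = res.getD i 0 + min m (n - s) := by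
          simp [List.getD_eq_getElem?_getD, hjlen]
        rw [h1]
        have hlt : ¬ i < i := by omega
        have hlt2 : i < i + 1 := by omega
        simp only [hlt, if_false, hlt2, if_true]
        have e1 : ((i : Int) + 1 - i) * m = m := by ring
        have e2 : ((i : Int) + 1 - i - 1) * m = 0 := by ring
        push_cast
        rw [e1, e2]
        omega
      · have h1 : (res.set j (res.getD j 0 + min m (n - s))).getD i 0 = res.getD i 0 := by
          simp [List.getD_eq_getElem?_getD, List.getElem?_set_ne (by omega : j ≠ i)]
        rw [h1]
        by_cases hlt : i < j
        · have hlt2 : i < j + 1 := by omega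
          simp only [hlt, if_true, hlt2, if_true, hR']
          have k1 := pv_key ((j : Int) - i) m (n - s) (by omega) hR
          have k2 := pv_key ((j : Int) - i - 1) m (n - s) (by omega) hR
          have e1 : ((j : Int) - i + 1) = ((j : Int) + 1 - i) := by ring
          have e2 : ((j : Int) - i - 1 + 1) = ((j : Int) + 1 - i - 1) := by ring
          rw [e1] at k1; rw [e2] at k2
          push_cast
          omega
        · have hlt2 : ¬ i < j + 1 := by omega
          simp only [hlt, if_false, hlt2, if_false]
    · have k := pv_key (j : Int) m (n - s) (by positivity) hR
      rw [hR']
      push_cast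
      push_cast at k
      omega

lemma pv_getD_map_range (g : Nat → Int) (N i : Nat) (h : i < N) :
    ((List.range N).map g).getD i 0 = g i := by
  simp [List.getD_eq_getElem?_getD, h]

set_option maxHeartbeats 1600000 in
theorem pv_main (n k b : Int) : get_shifted_array n k b = get_shifted_array_alt n k b := by
  by_cases hgt : pvRound53 (b * (1 + b) / 2) > n
  · simp [get_shifted_array, get_shifted_array_alt, hgt]
  · have hs0le : pvRound53 (b * (1 + b) / 2) ≤ n := not_lt.1 hgt
    simp only [get_shifted_array, get_shifted_array_alt]
    rw [if_neg hgt, if_neg hgt]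
    set s0 := pvRound53 (b * (1 + b) / 2) with hs0def
    clear_value s0
    set N := b.toNat with hNdef
    have hpr : PySem.List.pyRange 0 b 1 = (List.range N).map (fun i : Nat => (i : Int)) := by
      rw [PySem.List.pyRange_one]
      simp
      rfl
    have hrev : (PySem.List.pyRange 0 b 1).reverse
        = (List.range N).reverse.map (fun i : Nat => (i : Int)) := by
      rw [hpr, ← List.map_reverse]
    have hres : (PySem.List.pyRange 0 b 1).map (fun x => x + 1)
        = (List.range N).map (fun i : Nat => (i : Int) + 1) := by
      rw [hpr, List.map_map]
      rfl
    have hresB : PySem.List.pyRange 1 (b + 1) 1 = (List.range N).map (fun i : Nat => (i : Int) + 1) := by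
      rw [PySem.List.pyRange_one]
      have h1 : (b + 1 - 1).toNat = N := by omega
      rw [h1]
      apply List.map_congr_left
      intro i _
      ring
    rw [hrev, hres, hresB]
    rw [pv_loopA_char (k - b) n N _ s0 (by simp) hs0le]
    set m := k - b with hmdef
    set R := n - s0 with hRdef
    have hR0 : 0 ≤ R := by omega
    simp only [List.length_map, List.length_range]
    have hfin : (List.map (fun i =>
          (List.map (fun i : Nat => (i : Int) + 1) (List.range N)).getD i 0 +
            if i < N then min (((N : Int) - i) * m) R - min (((N : Int) - i - 1) * m) R else 0)
        (List.range N)) = List.map (fun i : Nat => (i : Int) + 1 +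
          (min (((N : Int) - i) * m) R - min (((N : Int) - i - 1) * m) R)) (List.range N) := by
      apply List.map_congr_left
      intro i hi
      rw [List.mem_range] at hi
      rw [pv_getD_map_range _ _ _ hi, if_pos hi]
    rw [hfin]
    by_cases hinf : R > (N : Int) * m
    · -- infeasible on both sides
      rw [if_pos (show R > (N : Int) * m from hinf),
          if_pos (show s0 + min ((N : Int) * m) R < n by omega)]
    · rw [if_neg hinf]
      push_neg at hinf
      have hmin : min ((N : Int) * m) R = R := min_eq_right hinf
      rw [hmin, if_neg (show ¬ s0 + R < n by omega)]
      by_cases hZ : R = 0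
      · -- surplus = 0: A's shifts are all 0, B returns the base list
        rw [if_neg (by simpa using hZ)]
        apply List.map_congr_left
        intro i hi
        rw [List.mem_range] at hi
        have hNm : 0 ≤ (N : Int) * m := by omega
        have hNposZ : (0 : Int) < (N : Int) := by exact_mod_cast Nat.zero_lt_of_lt hi
        have hm0 : 0 ≤ m := by
          by_contra hcon
          push_neg at hcon
          nlinarith
        have h1 : 0 ≤ ((N : Int) - i) * m := mul_nonneg (by omega) hm0
        have h2 : 0 ≤ ((N : Int) - i - 1) * m := mul_nonneg (by omega) hm0
        rw [hZ, min_eq_right h1, min_eq_right h2]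
        ring
      · -- surplus > 0: m > 0, N > 0, closed-form placement
        rw [if_pos (by simpa using hZ)]
        have hRpos : 0 < R := lt_of_le_of_ne hR0 (Ne.symm hZ)
        have hNpos : 0 < N := by
          by_contra h
          have : N = 0 := by omega
          rw [this] at hinf; simp at hinf; omega
        have hm : 0 < m := by
          by_contra h
          push_neg at h
          have : (N : Int) * m ≤ 0 := mul_nonpos_of_nonneg_of_nonpos (by positivity) h
          omega
        have hfd : PySem.Int.floordiv R m = R / m := PySem.Int.floordiv_eq_ediv_of_pos hm
        have hmod : PySem.Int.mod R m = R % m := PySem.Int.mod_eq_emod_of_pos hm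
        rw [hfd, hmod]
        have hF0 : 0 ≤ R / m := Int.ediv_nonneg hR0 hm.le
        have he : m * (R / m) + R % m = R := Int.ediv_add_emod R m
        have hrem0 : 0 ≤ R % m := Int.emod_nonneg R hm.ne'
        have hrem1 : R % m < m := Int.emod_lt_of_pos R hm
        have hFleN : R / m ≤ (N : Int) := by
          by_contra h
          push_neg at h
          have : ((N : Int) + 1) * m ≤ (R / m) * m := mul_le_mul_of_nonneg_right (by omega) hm.le
          nlinarith
        set F := (R / m).toNat with hFdef
        have hFc : ((F : Nat) : Int) = R / m := Int.toNat_of_nonneg hF0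
        have hFN : F ≤ N := by omega
        have hFm : m * (F : Int) ≤ R := by rw [hFc]; omega
        have hF1m : R < m * ((F : Int) + 1) := by rw [hFc]; nlinarith [he, hrem1]
        have hcut0 : (0 : Int) ≤ (N : Int) - R / m := by omega
        set C := N - F with hCdef
        have hcutC : ((N : Int) - R / m).toNat = C := by omega
        have hlenmap : ((List.range N).map (fun i : Nat => (i : Int) + 1)).length = N := by simp
        -- the two slices
        have hslice1 : PySem.List.slice ((List.range N).map (fun i : Nat => (i : Int) + 1)) none (some ((N : Int) - R / m))
            = (List.range C).map (fun i : Nat => (i : Int) + 1) := by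
          rw [PySem.List.slice_to, hcutC]
          rw [← List.map_take, List.take_range, Nat.min_eq_left (by omega)]
          omega
        have hslice2 : PySem.List.slice ((List.range N).map (fun i : Nat => (i : Int) + 1)) (some ((N : Int) - R / m)) none
            = (List.range F).map (fun j : Nat => ((C + j : Nat) : Int) + 1) := by
          rw [PySem.List.slice_from, hcutC]
          rw [← List.map_drop]
          have : (List.range N).drop C = (List.range F).map (fun j => C + j) := by
            have hsum : N = C + F := by omega
            rw [hsum, List.range_add, List.drop_append_of_le_length (by simp)]
            simp
          rw [this, List.map_map]
          · rfl
          · omega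
        rw [hslice1, hslice2]
        -- split A's range N into [0,C) ++ [C, N)
        have hsplitA : List.range N = List.range C ++ (List.range F).map (fun j => C + j) := by
          have hsum : N = C + F := by omega
          rw [hsum, List.range_add]
        -- formulas for A's element values
        have hAtail : ∀ j : Nat, j < F →
            ((((C + j : Nat)) : Int) + 1 +
              (min (((N : Int) - (C + j : Nat)) * m) R - min (((N : Int) - (C + j : Nat) - 1) * m) R))
            = (((C + j : Nat) : Int) + 1) + m := by
          intro j hj
          have hc1 : ((N : Int) - ((C + j : Nat) : Int)) = (F : Int) - j := by push_cast; omega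
          have hc2 : ((N : Int) - ((C + j : Nat) : Int) - 1) = (F : Int) - j - 1 := by push_cast; omega
          rw [hc2, hc1]
          have h1 : ((F : Int) - j) * m ≤ (F : Int) * m := mul_le_mul_of_nonneg_right (by omega) hm.le
          have h2 : ((F : Int) - j - 1) * m ≤ (F : Int) * m := mul_le_mul_of_nonneg_right (by omega) hm.le
          rw [min_eq_left (by nlinarith [hFm]), min_eq_left (by nlinarith [hFm])]
          ring
        have hAhead0 : ∀ i : Nat, i + 1 < C →
            ((i : Int) + 1 + (min (((N : Int) - i) * m) R - min (((N : Int) - i - 1) * m) R))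
            = (i : Int) + 1 := by
          intro i hi
          have h1 : ((F : Int) + 1) * m ≤ ((N : Int) - i - 1) * m :=
            mul_le_mul_of_nonneg_right (by omega) hm.le
          have h2 : ((F : Int) + 1) * m ≤ ((N : Int) - i) * m :=
            mul_le_mul_of_nonneg_right (by omega) hm.le
          rw [min_eq_right (by nlinarith [hF1m]), min_eq_right (by nlinarith [hF1m])]
          ring
        by_cases hp : R % m = 0
        · -- no partial: B returns head ++ shifted tail directly
          rw [if_neg (by simpa using hp)]
          rw [hsplitA, List.map_append, List.map_map, List.map_map]
          congr 1
          · apply List.map_congr_left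
            intro i hi
            rw [List.mem_range] at hi
            by_cases hlast : i + 1 = C
            · -- i = C - 1: shift = partial = 0
              have hc1 : ((N : Int) - i) = (F : Int) + 1 := by omega
              have hc2 : ((N : Int) - i - 1) = (F : Int) := by omega
              rw [hc2, hc1]
              rw [min_eq_right (by nlinarith [hF1m]), min_eq_left (by rw [mul_comm]; exact hFm)]
              have hRe : R = (F : Int) * m := by
                rw [hFc]
                have h2 : (R / m) * m = m * (R / m) := mul_comm _ _
                linarith [he, hp]
              rw [hRe]; ring
            · exact hAhead0 i (by omega)
          · apply List.map_congr_left
            intro j hj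
            rw [List.mem_range] at hj
            simp only [Function.comp]
            exact hAtail j hj
        · -- partial ≠ 0: B sets index cut-1
          rw [if_pos (by simpa using hp)]
          have hCpos : 0 < C := by
            by_contra hcon
            have hFN' : (F : Int) = (N : Int) := by omega
            have hRe : R = m * (N : Int) := by
              have hx : m * (N : Int) ≤ R := by rw [← hFN']; exact hFm
              have hy : (N : Int) * m = m * (N : Int) := mul_comm _ _
              linarith [hinf]
            exact hp (by simp [hRe, Int.mul_emod_right])
          have htn : (((N : Int) - R / m) - 1).toNat = C - 1 := by omega
          rw [htn]
          -- getD at C-1 lands in the head segment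
          have hgetD : ((List.range C).map (fun i : Nat => (i : Int) + 1)
                ++ (List.range F).map (fun j : Nat => (((C + j : Nat) : Int) + 1) + m)).getD (C - 1) 0
              = (C : Int) := by
            have hlt : C - 1 < ((List.range C).map (fun i : Nat => (i : Int) + 1)).length := by simp; omega
            rw [List.getD_eq_getElem?_getD, List.getElem?_append_left hlt]
            rw [← List.getD_eq_getElem?_getD, pv_getD_map_range _ _ _ (by omega)]
            omega
          have hmapm : ((List.range F).map (fun j : Nat => ((C + j : Nat) : Int) + 1)).map (fun x => x + m)
              = (List.range F).map (fun j : Nat => (((C + j : Nat) : Int) + 1) + m) := by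
            rw [List.map_map]; rfl
          rw [hmapm, hgetD]
          -- set lands in the head segment too
          have hset : ((List.range C).map (fun i : Nat => (i : Int) + 1)
                ++ (List.range F).map (fun j : Nat => (((C + j : Nat) : Int) + 1) + m)).set (C - 1) ((C : Int) + R % m)
              = ((List.range C).map (fun i : Nat => (i : Int) + 1)).set (C - 1) ((C : Int) + R % m)
                ++ (List.range F).map (fun j : Nat => (((C + j : Nat) : Int) + 1) + m) := by
            apply List.set_append_left
            simp; omega
          rw [hset]
          rw [hsplitA, List.map_append, List.map_map]
          congr 1
          · -- head with the partial at position C-1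
            apply List.ext_getElem
            · simp
            · intro i h1 h2
              simp only [List.length_map, List.length_range] at h1
              by_cases hlast : i = C - 1
              · subst hlast
                rw [List.getElem_set_self (by simp; omega)]
                rw [List.getElem_map, List.getElem_range]
                have hc1 : ((N : Int) - ((C - 1 : Nat) : Int)) = (F : Int) + 1 := by omega
                have hc2 : ((N : Int) - ((C - 1 : Nat) : Int) - 1) = (F : Int) := by omega
                rw [hc2, hc1]
                rw [min_eq_right (by nlinarith [hF1m]), min_eq_left (by rw [mul_comm]; exact hFm)]
                have hpart : R - (F : Int) * m = R % m := by
                  have h2 : (R / m) * m = m * (R / m) := mul_comm _ _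
                  rw [hFc]
                  linarith [he]
                rw [hpart]
                omega
              · rw [List.getElem_set_ne (by omega)]
                rw [List.getElem_map, List.getElem_range, List.getElem_map, List.getElem_range]
                exact hAhead0 i (by omega)
          · apply List.map_congr_left
            intro j hj
            rw [List.mem_range] at hj
            simp only [Function.comp]
            exact hAtail j hj

-- ===== VERDICT (by name: the statement is the Claim_ definition above) =====
theorem get_shifted_array_spec : Claim_equal_get_shifted_array := by
  intro n k b _
  unfold Spec_get_shifted_array
  exact pv_main n k b
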